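-- pv_equiv track=rewrite | github.com/dmitryhd/NLP | Analyser.py | IntercectDicts
-- ===== SOURCE A (Python) =====
-- def IntercectDicts (listOfDicts):
--     base = listOfDicts[0]
--     basek = base.keys()
--     for d in listOfDicts:
--         basek = [val for val in basek if val in d.keys()]
--     res = {}
--     for key in basek:
--         res [key] = base[key]
--     return res
-- ===== SOURCE B (Python) =====
-- def IntercectDicts(listOfDicts):
--     base = listOfDicts[0]
--     counts = {}
--     for d in listOfDicts:
--         for key in d:
--             counts[key] = counts.get(key, 0) + 1
--     n = len(listOfDicts)
--     return {key: val for key, val in base.items() if counts.get(key, 0) == n}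
-- ===== Notes on version B (the rewrite author's own statement) =====
-- stated objective: alternative
-- what changed: Replaces A's k successive candidate-list narrowing passes plus a rebuild loop by a counting algorithm: one nested pass builds a counter of how many dicts contain each key, then base's items are kept exactly when their key's count equals the number of dicts; the empty-list IndexError is excluded by Pre_.
import Mathlib
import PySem

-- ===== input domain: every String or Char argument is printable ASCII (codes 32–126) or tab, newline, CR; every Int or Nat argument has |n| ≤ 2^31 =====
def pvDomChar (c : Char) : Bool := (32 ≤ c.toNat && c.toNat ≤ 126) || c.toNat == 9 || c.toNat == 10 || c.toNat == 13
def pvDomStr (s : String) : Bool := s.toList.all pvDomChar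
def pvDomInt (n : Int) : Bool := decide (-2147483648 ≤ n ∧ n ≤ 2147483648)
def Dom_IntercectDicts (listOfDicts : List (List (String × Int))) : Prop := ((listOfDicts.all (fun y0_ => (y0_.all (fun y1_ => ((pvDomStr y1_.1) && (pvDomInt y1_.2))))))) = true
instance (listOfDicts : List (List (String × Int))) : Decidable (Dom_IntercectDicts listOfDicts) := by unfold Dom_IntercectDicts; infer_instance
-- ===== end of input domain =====

-- B replaces A's k successive candidate-list narrowing passes plus a rebuild loop by a
-- counting algorithm: count in how many dicts each key occurs, keep base's items whose
-- count equals the number of dicts. Alternative decomposition, same cost.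

-- ===== PORT A =====
def IntercectDicts (listOfDicts : List (List (String × Int))) : List (String × Int) :=
  match listOfDicts with
  | [] => []  -- excluded by Pre_: Python raises IndexError here
  | base :: _ =>
    let baseD := PySem.Dict.ofList base
    -- basek = base.keys(); for d in listOfDicts: basek = [val for val in basek if val in d.keys()]
    let basek := listOfDicts.foldl
      (fun bk d => bk.filter (fun v => (PySem.Dict.ofList d).contains v)) baseD.keys
    -- res = {}; for key in basek: res[key] = base[key]
    let res := basek.foldl (fun r k => r.insert k (baseD.getD k 0)) PySem.Dict.empty
    res.items

-- ===== PORT B =====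
def IntercectDicts_alt (listOfDicts : List (List (String × Int))) : List (String × Int) :=
  match listOfDicts with
  | [] => []  -- excluded by Pre_: Python raises IndexError here
  | base :: _ =>
    -- counts = {}; for d in listOfDicts: for key in d: counts[key] = counts.get(key, 0) + 1
    let counts := listOfDicts.foldl
      (fun c d => (PySem.Dict.ofList d).keys.foldl (fun c k => c.modify k 0 (· + 1)) c)
      PySem.Dict.empty
    let n : Int := listOfDicts.length
    -- {key: val for key, val in base.items() if counts.get(key, 0) == n}
    (PySem.Dict.ofList base).items.filter (fun p => counts.getD p.1 0 == n)

-- ===== PRECONDITION & SPEC =====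
-- Pre_ excludes only the empty list, on which Python's A (and B) raise IndexError.
def Pre_IntercectDicts (listOfDicts : List (List (String × Int))) : Prop := listOfDicts ≠ []
instance (listOfDicts : List (List (String × Int))) : Decidable (Pre_IntercectDicts listOfDicts) := by unfold Pre_IntercectDicts; infer_instance
def pvWitness_IntercectDicts : (List (List (String × Int))) := [[("a", 1), ("b", 2)], [("b", 3), ("a", 9)]]

def Spec_IntercectDicts (listOfDicts : List (List (String × Int))) (out : List (String × Int)) : Prop := out = IntercectDicts_alt listOfDicts
instance (listOfDicts : List (List (String × Int))) (out : List (String × Int)) : Decidable (Spec_IntercectDicts listOfDicts out) := by unfold Spec_IntercectDicts; infer_instance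

-- ===== CLAIM (what is proved, stated in full; the proofs are below) =====
def Claim_equal_IntercectDicts : Prop := ∀ (listOfDicts : List (List (String × Int))), Dom_IntercectDicts listOfDicts → Pre_IntercectDicts listOfDicts → Spec_IntercectDicts listOfDicts (IntercectDicts listOfDicts)

-- ===== LEMMAS AND PROOFS =====

-- A-side: a fold of successive filters is one filter with an 'all' predicate
theorem foldl_filter_eq_filter_all {α β : Type} (p : β → α → Bool) :
    ∀ (ds : List β) (bk : List α),
      ds.foldl (fun bk d => bk.filter (fun v => p d v)) bk
        = bk.filter (fun v => ds.all (fun d => p d v)) := by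
  intro ds
  induction ds with
  | nil => intro bk; simp
  | cons d ds ih =>
    intro bk
    simp only [List.foldl_cons, ih, List.filter_filter, List.all_cons]
    congr 1
    funext v
    exact Bool.and_comm _ _

-- B-side: the nested counting fold produces, at key k, the sum over dicts of
-- the multiplicity of k among that dict's keys
theorem counts_getD (k : String) :
    ∀ (l : List (List (String × Int))) (c : PySem.Dict String Int),
      (l.foldl (fun c d => (PySem.Dict.ofList d).keys.foldl
          (fun c k => c.modify k 0 (· + 1)) c) c).getD k 0
        = c.getD k 0 + (l.map (fun d => (((PySem.Dict.ofList d).keys.count k : Int)))).sum := by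
  intro l
  induction l with
  | nil => intro c; simp
  | cons d l ih =>
    intro c
    simp only [List.foldl_cons, List.map_cons, List.sum_cons, ih,
      PySem.Dict.getD_foldl_modify_add_one]
    ring

-- the per-key counts are nonnegative and at most the number of dicts
theorem sum_counts_le_length (k : String) :
    ∀ (l : List (List (String × Int))),
      (l.map (fun d => (((PySem.Dict.ofList d).keys.count k : Int)))).sum ≤ (l.length : Int) := by
  intro l
  induction l with
  | nil => simp
  | cons e l ih =>
    have h1 : (PySem.Dict.ofList e).keys.count k ≤ 1 :=
      List.nodup_iff_count_le_one.mp (PySem.Dict.nodup_keys_ofList e) k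
    simp only [List.map_cons, List.sum_cons, List.length_cons]
    push_cast
    omega

-- the sum of per-dict multiplicities equals the number of dicts iff every dict contains k
theorem sum_counts_eq_length_iff (k : String) :
    ∀ (l : List (List (String × Int))),
      ((l.map (fun d => (((PySem.Dict.ofList d).keys.count k : Int)))).sum = (l.length : Int))
        ↔ l.all (fun d => (PySem.Dict.ofList d).contains k) = true := by
  intro l
  induction l with
  | nil => simp
  | cons d l ih =>
    have hnd : ((PySem.Dict.ofList d).keys).Nodup := PySem.Dict.nodup_keys_ofList d
    have hle : (PySem.Dict.ofList d).keys.count k ≤ 1 := List.nodup_iff_count_le_one.mp hnd k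
    have hsle := sum_counts_le_length k l
    have hsge : (0 : Int) ≤ (l.map (fun d => (((PySem.Dict.ofList d).keys.count k : Int)))).sum := by
      apply List.sum_nonneg
      intro x hx
      simp only [List.mem_map] at hx
      obtain ⟨e, _, rfl⟩ := hx
      positivity
    have hcont : (PySem.Dict.ofList d).contains k = true ↔ (PySem.Dict.ofList d).keys.count k = 1 := by
      rw [PySem.Dict.contains_iff_mem_keys, ← List.count_pos_iff]
      omega
    simp only [List.map_cons, List.sum_cons, List.length_cons, List.all_cons,
      Bool.and_eq_true, ← ih, hcont]
    push_cast
    omega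

theorem IntercectDicts_spec : Claim_equal_IntercectDicts := by
  intro l _ hpre
  unfold Spec_IntercectDicts IntercectDicts IntercectDicts_alt
  cases l with
  | nil => exact absurd rfl hpre
  | cons base rest =>
    simp only
    rw [foldl_filter_eq_filter_all]
    set L := base :: rest with hL
    set baseD := PySem.Dict.ofList base with hB
    set ks := baseD.keys.filter
      (fun k => L.all (fun d => (PySem.Dict.ofList d).contains k)) with hks
    have hnd : ks.Nodup := (PySem.Dict.nodup_keys_ofList base).filter _
    -- A's side: the rebuild loop over the fresh distinct keys ks appends its pairs
    have hA := PySem.Dict.items_foldl_insert_fresh (l := ks) (k := fun k => k)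
      (v := fun k => baseD.getD k 0) (d := PySem.Dict.empty)
      (by intro a _; exact PySem.Dict.contains_empty a)
      (by simpa using hnd)
    rw [hA]
    -- B's side: items = keys.map, then filter and map commute, then the counting
    -- predicate coincides with the 'all contains' predicate
    rw [PySem.Dict.items_eq_map_keys baseD (PySem.Dict.nodup_keys_ofList base) 0,
        List.filter_map]
    simp only [show (PySem.Dict.empty : PySem.Dict String Int).items = [] from rfl, List.nil_append]
    refine congrArg (List.map _) ?_
    rw [hks]
    refine (List.filter_congr ?_).symm
    intro k _
    simp only [Function.comp_def]
    rw [counts_getD]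
    simp only [PySem.Dict.getD_empty, zero_add]
    rw [Bool.eq_iff_iff, beq_iff_eq]
    exact sum_counts_eq_length_iff k L

-- ===== VERDICT was stated above by name =====
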